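-- pv_equiv track=rewrite | github.com/matheussevilha/Exercicios-PI-UFABC | matrizes/matriz_borda1_meio0.py | matriz_bordas
-- ===== SOURCE A (Python) =====
-- def matriz_bordas (m: int,n: int) -> list:
--     M = []
--     for i in range(m):
--         linha = []
--         for j in range(n):
--             if i == 0 or i == m-1 or j == 0 or j == n-1:
--                 linha.append(1)
--             else:
--                 linha.append(0)
--         M.append(linha)
--     return M
-- ===== SOURCE B (Python) =====
-- def matriz_bordas(m: int, n: int) -> list:
--     # Build rows by pattern: top/bottom row of ones, bordered middle row copied.
--     if m <= 0:
--         return []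
--     ones = [1] * n
--     if n >= 2:
--         mid = [1] + [0] * (n - 2) + [1]
--     else:
--         mid = [1] * n
--     if m >= 2:
--         return [ones] + [list(mid) for _ in range(m - 2)] + [list(ones)]
--     return [ones]
-- ===== Notes on version B (the rewrite author's own statement) =====
-- stated objective: alternative
-- what changed: B constructs the matrix from row patterns (a ones row and a bordered middle row, each built once and replicated) instead of A's per-cell border test inside two nested loops.
import Mathlib
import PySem

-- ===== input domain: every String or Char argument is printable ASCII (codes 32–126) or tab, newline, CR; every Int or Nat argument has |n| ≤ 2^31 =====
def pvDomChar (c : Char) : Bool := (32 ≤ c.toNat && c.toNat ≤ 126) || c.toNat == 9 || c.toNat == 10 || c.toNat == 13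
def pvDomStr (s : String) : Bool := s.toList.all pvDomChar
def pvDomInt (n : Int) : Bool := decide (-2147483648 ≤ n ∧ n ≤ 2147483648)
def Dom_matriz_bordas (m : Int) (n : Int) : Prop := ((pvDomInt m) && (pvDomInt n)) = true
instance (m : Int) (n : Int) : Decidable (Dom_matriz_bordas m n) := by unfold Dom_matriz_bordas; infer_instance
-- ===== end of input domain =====

-- B builds the matrix from row patterns (ones row, bordered middle row) instead of A's per-cell test; objective: alternative decomposition.

-- ===== PORT A =====
-- literal port of A: outer loop over range(m) appending rows, inner loop over range(n) appending 1 or 0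
def matriz_bordas (m : Int) (n : Int) : List (List Int) :=
  (PySem.List.pyRange 0 m 1).foldl (fun M i =>
    M ++ [(PySem.List.pyRange 0 n 1).foldl (fun linha j =>
      if i = 0 ∨ i = m - 1 ∨ j = 0 ∨ j = n - 1 then linha ++ [1] else linha ++ [0]) []]) []

-- ===== PORT B =====
def matriz_bordas_alt (m : Int) (n : Int) : List (List Int) :=
  if m ≤ 0 then []
  else
    let ones : List Int := List.replicate n.toNat 1
    let mid : List Int := if 2 ≤ n then [1] ++ List.replicate (n - 2).toNat 0 ++ [1]
                          else List.replicate n.toNat 1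
    if 2 ≤ m then [ones] ++ (List.range (m - 2).toNat).map (fun _ => mid) ++ [ones]
    else [ones]

-- ===== PRECONDITION & SPEC =====
def Spec_matriz_bordas (m : Int) (n : Int) (out : List (List Int)) : Prop := out = matriz_bordas_alt m n
instance (m : Int) (n : Int) (out : List (List Int)) : Decidable (Spec_matriz_bordas m n out) := by unfold Spec_matriz_bordas; infer_instance

-- ===== CLAIM (what is proved, stated in full; the proofs are below) =====
def Claim_equal_matriz_bordas : Prop := ∀ (m : Int) (n : Int), Dom_matriz_bordas m n → Spec_matriz_bordas m n (matriz_bordas m n)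

-- ===== LEMMAS AND PROOFS =====

-- generic "border list" shape: a map over range (t+2) whose value is `a` at both ends and `b` strictly inside
theorem pv_border_list {α : Type} (t : Nat) (a b : α) (f : Nat → α)
    (h0 : f 0 = a) (hl : f (t + 1) = a) (hm : ∀ k, 0 < k → k < t + 1 → f k = b) :
    (List.range (t + 2)).map f = [a] ++ List.replicate t b ++ [a] := by
  apply List.ext_getElem
  · simp only [List.length_map, List.length_range, List.length_append, List.length_replicate,
      List.length_cons, List.length_nil]
    omega
  · intro k h1 h2
    simp only [List.getElem_map, List.getElem_range]
    rcases Nat.eq_zero_or_pos k with hk0 | hkpos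
    · subst hk0
      have : ([a] ++ List.replicate t b ++ [a])[0]'h2 = a := by
        rw [List.getElem_append_left (by simp)]
        simp
      rw [this, h0]
    · by_cases hkl : k = t + 1
      · subst hkl
        have : ([a] ++ List.replicate t b ++ [a])[t + 1]'h2 = a := by
          rw [List.getElem_append_right (by simp)]
          simp
        rw [this, hl]
      · have hklt : k < t + 1 := by
          simp only [List.length_map, List.length_range] at h1; omega
        have : ([a] ++ List.replicate t b ++ [a])[k]'h2 = b := by
          rw [List.getElem_append_left (by simp; omega)]
          rw [List.getElem_append_right (by simp; omega)]
          simp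
        rw [this, hm k hkpos hklt]

-- a map over range with everywhere-equal value is a replicate
theorem pv_const_list {α : Type} (t : Nat) (a : α) (f : Nat → α)
    (h : ∀ k, k < t → f k = a) : (List.range t).map f = List.replicate t a := by
  rw [List.eq_replicate_iff]
  constructor
  · simp
  · intro b hb
    simp only [List.mem_map, List.mem_range] at hb
    obtain ⟨k, hk, rfl⟩ := hb
    exact h k hk

-- A's inner loop as a map over List.range
theorem pv_rowA (m n i : Int) :
    (PySem.List.pyRange 0 n 1).foldl (fun linha j =>
      if i = 0 ∨ i = m - 1 ∨ j = 0 ∨ j = n - 1 then linha ++ [1] else linha ++ [0]) []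
    = (List.range n.toNat).map (fun (j : Nat) =>
        if i = 0 ∨ i = m - 1 ∨ (j : Int) = 0 ∨ (j : Int) = n - 1 then (1 : Int) else 0) := by
  have h : (fun (linha : List Int) (j : Int) =>
      if i = 0 ∨ i = m - 1 ∨ j = 0 ∨ j = n - 1 then linha ++ [1] else linha ++ [0])
    = fun linha j => linha ++ [if i = 0 ∨ i = m - 1 ∨ j = 0 ∨ j = n - 1 then (1 : Int) else 0] := by
    funext linha j; split <;> rfl
  rw [h, PySem.List.foldl_append_singleton_eq_map, PySem.List.pyRange_one]
  simp only [List.nil_append, Int.sub_zero, List.map_map]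
  apply List.map_congr_left
  intro k _
  simp only [Function.comp_apply, zero_add]

-- A as a map of rows over List.range
theorem pv_A_map (m n : Int) :
    matriz_bordas m n = (List.range m.toNat).map (fun (i : Nat) =>
      (List.range n.toNat).map (fun (j : Nat) =>
        if (i : Int) = 0 ∨ (i : Int) = m - 1 ∨ (j : Int) = 0 ∨ (j : Int) = n - 1 then (1 : Int) else 0)) := by
  unfold matriz_bordas
  rw [PySem.List.foldl_append_singleton_eq_map, PySem.List.pyRange_one 0 m]
  simp only [List.nil_append, Int.sub_zero, List.map_map]
  apply List.map_congr_left
  intro k _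
  have := pv_rowA m n ((k : Int))
  simpa only [Function.comp_apply, zero_add] using this

-- a row whose Int row-index i is neither 0 nor m-1
theorem pv_mid_row (m n : Int) (i : Nat) (hi0 : (i : Int) ≠ 0) (him : (i : Int) ≠ m - 1) :
    (List.range n.toNat).map (fun (j : Nat) =>
        if (i : Int) = 0 ∨ (i : Int) = m - 1 ∨ (j : Int) = 0 ∨ (j : Int) = n - 1 then (1 : Int) else 0)
    = if 2 ≤ n then [1] ++ List.replicate (n - 2).toNat 0 ++ [1] else List.replicate n.toNat 1 := by
  by_cases hn : 2 ≤ n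
  · rw [if_pos hn]
    have ht : n.toNat = (n - 2).toNat + 2 := by omega
    rw [ht]
    apply pv_border_list
    · simp [him]
    · have h1 : (((n - 2).toNat + 1 : Nat) : Int) = n - 1 := by omega
      simp [him, h1]
    · intro k hk1 hk2
      have h1 : ¬ ((k : Int) = 0) := by omega
      have h2 : ¬ ((k : Int) = n - 1) := by omega
      have h3 : i ≠ 0 := by omega
      have h4 : k ≠ 0 := by omega
      simp [him, h2, h3, h4]
  · rw [if_neg hn]
    apply pv_const_list
    intro k hk
    have : (k : Int) = 0 := by omega
    simp [this]

-- a row whose Int row-index i is 0 or m-1 is all ones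
theorem pv_ones_row (m n : Int) (i : Nat) (hi : (i : Int) = 0 ∨ (i : Int) = m - 1) :
    (List.range n.toNat).map (fun (j : Nat) =>
        if (i : Int) = 0 ∨ (i : Int) = m - 1 ∨ (j : Int) = 0 ∨ (j : Int) = n - 1 then (1 : Int) else 0)
    = List.replicate n.toNat 1 := by
  apply pv_const_list
  intro k _
  rcases hi with h | h <;> simp [h]

-- ===== VERDICT (by name: the statement is the Claim_ definition above) =====
theorem matriz_bordas_spec : Claim_equal_matriz_bordas := by
  intro m n _
  unfold Spec_matriz_bordas matriz_bordas_alt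
  rw [pv_A_map]
  by_cases hm0 : m ≤ 0
  · rw [if_pos hm0]
    have : m.toNat = 0 := by omega
    simp [this]
  · rw [if_neg hm0]
    by_cases hm2 : 2 ≤ m
    · rw [if_pos hm2]
      have ht : m.toNat = (m - 2).toNat + 2 := by omega
      rw [ht, pv_const_list (m - 2).toNat
        (if 2 ≤ n then [1] ++ List.replicate (n - 2).toNat 0 ++ [1] else List.replicate n.toNat (1 : Int))
        (fun _ => if 2 ≤ n then [1] ++ List.replicate (n - 2).toNat 0 ++ [1] else List.replicate n.toNat (1 : Int))
        (fun _ _ => rfl)]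
      apply pv_border_list
      · exact pv_ones_row m n 0 (by simp)
      · apply pv_ones_row
        right; omega
      · intro k hk1 hk2
        exact pv_mid_row m n k (by omega) (by omega)
    · rw [if_neg hm2]
      have ht : m.toNat = 1 := by omega
      rw [ht]
      simp only [List.range_one, List.map_cons, List.map_nil]
      rw [pv_ones_row m n 0 (by simp)]
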